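-- pv_equiv track=rewrite | github.com/Alexponomarev7/svg-vae | helpers.py | get_same_padding_transpose
-- ===== SOURCE A (Python) =====
-- def get_same_padding_transpose(size, kernel_size, stride):
--     def check(clen, cpad):
--         return (clen - 1) * stride - 2 * cpad + (kernel_size - 1) + 1
--
--     h_pad = 0
--     while check(size[0], h_pad) > size[0] * stride:
--         h_pad += 1
--
--     w_pad = 0
--     while check(size[1], w_pad) > size[1] * stride:
--         w_pad += 1
--
--     return (h_pad, w_pad), size[0] * stride - check(size[0], h_pad)
-- ===== SOURCE B (Python) =====
-- def get_same_padding_transpose(size, kernel_size, stride):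
--     # closed form: smallest pad >= 0 with (kernel_size - stride) <= 2*pad
--     pad = max(0, (kernel_size - stride + 1) // 2)
--     offset = stride - kernel_size + 2 * pad
--     return (pad, pad), offset
-- ===== Notes on version B (the rewrite author's own statement) =====
-- stated objective: simpler
-- what changed: Both while-loops are replaced by the closed form pad = max(0, (kernel_size - stride + 1)//2) (the loop condition is independent of size), and the offset simplifies algebraically to stride - kernel_size + 2*pad.
import Mathlib
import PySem

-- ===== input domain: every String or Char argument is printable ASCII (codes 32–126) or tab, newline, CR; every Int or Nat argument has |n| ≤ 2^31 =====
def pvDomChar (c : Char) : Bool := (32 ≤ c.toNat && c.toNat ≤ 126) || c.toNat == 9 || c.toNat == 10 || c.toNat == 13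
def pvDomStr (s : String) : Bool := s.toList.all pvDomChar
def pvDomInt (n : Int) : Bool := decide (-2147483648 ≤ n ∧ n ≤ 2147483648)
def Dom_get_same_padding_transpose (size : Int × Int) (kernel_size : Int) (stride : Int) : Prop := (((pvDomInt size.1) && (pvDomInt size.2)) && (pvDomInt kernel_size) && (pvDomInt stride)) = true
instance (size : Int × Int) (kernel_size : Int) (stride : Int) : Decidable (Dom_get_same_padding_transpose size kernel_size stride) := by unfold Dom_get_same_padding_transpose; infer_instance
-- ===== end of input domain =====

-- B replaces A's two counting while-loops by the closed form pad = max 0 ((kernel_size - stride + 1) // 2)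
-- and simplifies the offset algebraically; objective: simpler.

-- ===== PORT A =====
-- the inner helper 'check'
def pvCheck (kernel_size stride clen cpad : Int) : Int :=
  (clen - 1) * stride - 2 * cpad + (kernel_size - 1) + 1

-- the while-loop 'pad = 0; while check(clen, pad) > clen*stride: pad += 1'
def pvPadLoop (kernel_size stride clen p : Int) : Int :=
  if pvCheck kernel_size stride clen p > clen * stride then
    pvPadLoop kernel_size stride clen (p + 1)
  else p
termination_by (kernel_size - stride - 2 * p).toNat
decreasing_by
  rename_i h
  simp only [pvCheck, gt_iff_lt] at h
  have hr : (clen - 1) * stride = clen * stride - stride := by ring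
  omega

def get_same_padding_transpose (size : Int × Int) (kernel_size : Int) (stride : Int) : (Int × Int) × Int :=
  let h_pad := pvPadLoop kernel_size stride size.1 0
  let w_pad := pvPadLoop kernel_size stride size.2 0
  ((h_pad, w_pad), size.1 * stride - pvCheck kernel_size stride size.1 h_pad)

-- ===== PORT B =====
def get_same_padding_transpose_alt (size : Int × Int) (kernel_size : Int) (stride : Int) : (Int × Int) × Int :=
  let pad := max 0 (PySem.Int.floordiv (kernel_size - stride + 1) 2)
  ((pad, pad), stride - kernel_size + 2 * pad)

-- ===== PRECONDITION & SPEC =====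
def Spec_get_same_padding_transpose (size : Int × Int) (kernel_size : Int) (stride : Int) (out : (Int × Int) × Int) : Prop := out = get_same_padding_transpose_alt size kernel_size stride
instance (size : Int × Int) (kernel_size : Int) (stride : Int) (out : (Int × Int) × Int) : Decidable (Spec_get_same_padding_transpose size kernel_size stride out) := by unfold Spec_get_same_padding_transpose; infer_instance

-- ===== CLAIM (what is proved, stated in full; the proofs are below) =====
def Claim_equal_get_same_padding_transpose : Prop := ∀ (size : Int × Int) (kernel_size : Int) (stride : Int), Dom_get_same_padding_transpose size kernel_size stride → Spec_get_same_padding_transpose size kernel_size stride (get_same_padding_transpose size kernel_size stride)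

-- ===== LEMMAS AND PROOFS =====

-- the loop, started at p, stops at max p ((kernel_size - stride + 1) // 2)
theorem pvPadLoop_eq (kernel_size stride clen p : Int) :
    pvPadLoop kernel_size stride clen p
      = max p (PySem.Int.floordiv (kernel_size - stride + 1) 2) := by
  fun_induction pvPadLoop with
  | case1 p h ih =>
    rw [ih]
    simp only [pvCheck, gt_iff_lt] at h
    have hr : (clen - 1) * stride = clen * stride - stride := by ring
    have hle : p + 1 ≤ PySem.Int.floordiv (kernel_size - stride + 1) 2 := by
      rw [PySem.Int.le_floordiv_iff_mul_le (hb := by omega)]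
      omega
    omega
  | case2 p h =>
    simp only [pvCheck, gt_iff_lt, not_lt] at h
    have hr : (clen - 1) * stride = clen * stride - stride := by ring
    have hlt : PySem.Int.floordiv (kernel_size - stride + 1) 2 < p + 1 := by
      rw [PySem.Int.floordiv_lt_iff_lt_mul (hb := by omega)]
      omega
    omega

-- ===== VERDICT (by name: the statement is the Claim_ definition above) =====
theorem get_same_padding_transpose_spec : Claim_equal_get_same_padding_transpose := by
  intro size k s _
  show _ = _
  simp only [get_same_padding_transpose, get_same_padding_transpose_alt,
    pvPadLoop_eq, pvCheck]
  exact Prod.ext rfl (by ring)
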